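-- pv_equiv track=rewrite | github.com/q13245632/CodeWars | Modulinumbersystem.py | fromNb2Str
-- ===== SOURCE A (Python) =====
-- from itertools import combinations
-- from itertools import combinations
-- from itertools import combinations
-- from itertools import combinations
--
-- def isCoPrime(a,b):
--     c = 0
--     max_n = max(a,b)
--     min_n = min(a,b)
--     if max_n % min_n == 0:
--         c = min_n
--     else:
--         while True:
--             temp = max_n % min_n
--             if temp == 0:
--                 break
--             else:
--                 max_n = min_n
--                 min_n = temp
--     c = min_n
--     if c == 1:
--         return True
--     else:
--         return False
--
-- def fromNb2Str(n, modsys):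
--     mul = 1
--     for a in modsys:
--         mul = mul * a
--     if mul <= n:
--         return "Not applicable"
--     if len(modsys) >= 2:
--         lst = list(combinations(modsys,2))
--         if not all([isCoPrime(b[0],b[1]) for b in lst]):
--             return "Not applicable"
--         else:
--             string = "-"
--             list_ = [str(n % x) for x in modsys]
--             string += "--".join(list_) + "-"
--             return string
--     return "Not applicable"
-- ===== SOURCE B (Python) =====
-- from math import gcd
--
-- CAP = 1 << 62  # inputs are bounded (|n| <= 2**31), so a product beyond CAP already exceeds any n
--
-- def fromNb2Str(n, modsys):
--     if len(modsys) < 2 or any(m < 1 for m in modsys):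
--         return "Not applicable"
--     total = 1
--     for m in modsys:
--         total = total * m
--         if total > CAP:
--             break
--     else:
--         if total <= n:
--             return "Not applicable"
--     seen = 1
--     for m in modsys:
--         if gcd(m, seen) != 1:
--             return "Not applicable"
--         seen = seen * m
--     return "-" + "--".join(str(n % m) for m in modsys) + "-"
-- ===== Notes on version B (the rewrite author's own statement) =====
-- stated objective: faster
-- what changed: Replaces the all-pairs hand-rolled Euclid coprimality test over itertools.combinations by a single left-to-right pass testing math.gcd(m, seen) against a running product (with an explicit positivity check replacing A's sign-preserving Euclid rejecting non-positive moduli), and saturates the product used only for the 'product <= n' comparison at 2^62, sound since |n| <= 2^31 on the stated domain.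
import Mathlib
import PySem

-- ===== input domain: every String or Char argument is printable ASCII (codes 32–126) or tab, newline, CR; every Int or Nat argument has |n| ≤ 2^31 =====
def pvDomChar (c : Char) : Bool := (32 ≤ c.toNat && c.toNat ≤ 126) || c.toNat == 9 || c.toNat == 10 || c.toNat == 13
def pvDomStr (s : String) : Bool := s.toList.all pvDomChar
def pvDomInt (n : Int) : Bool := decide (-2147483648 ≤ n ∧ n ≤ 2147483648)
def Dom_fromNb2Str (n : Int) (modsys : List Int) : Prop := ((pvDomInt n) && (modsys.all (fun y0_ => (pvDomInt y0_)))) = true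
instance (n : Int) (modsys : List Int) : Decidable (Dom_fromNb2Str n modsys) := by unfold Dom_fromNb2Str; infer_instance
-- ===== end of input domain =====

-- B replaces A's all-pairs hand-rolled-Euclid coprimality test by a single pass with a running
-- product and gcd (plus an explicit positivity check), and caps the product used for the
-- `product <= n` comparison at 2^62 (sound on the stated domain |n| <= 2^31); faster:
-- O(k) vs O(k^2) gcd computations, and no unbounded big-integer product.

-- ===== PORT A =====
-- termination fact for the transliterated while-loop (cited by pyEuclid's decreasing_by)
theorem pyModAbs_lt (mx mn : Int) (h : mn ≠ 0) : (PySem.Int.mod mx mn).natAbs < mn.natAbs := by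
  rcases lt_trichotomy mn 0 with hlt | heq | hgt
  · have := PySem.Int.mod_neg_bounds mx hlt
    omega
  · exact absurd heq h
  · have h1 := PySem.Int.mod_nonneg mx hgt
    have h2 := PySem.Int.mod_lt mx hgt
    omega

-- the `while True` loop of isCoPrime; the `mn = 0` branch is a totality guard only
-- (there Python raises ZeroDivisionError; such inputs are outside Pre_fromNb2Str)
def pyEuclid (mx mn : Int) : Int :=
  let temp := PySem.Int.mod mx mn
  if temp = 0 then mn
  else if mn = 0 then 0
  else pyEuclid mn temp
termination_by mn.natAbs
decreasing_by exact pyModAbs_lt mx mn (by assumption)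

def isCoPrime (a b : Int) : Bool :=
  let max_n := max a b
  let min_n := min a b
  let c := if PySem.Int.mod max_n min_n = 0 then min_n else pyEuclid max_n min_n
  decide (c = 1)

-- list(combinations(modsys, 2)) in itertools order
def pyPairs : List Int → List (Int × Int)
  | [] => []
  | x :: xs => xs.map (fun y => (x, y)) ++ pyPairs xs

def fromNb2Str (n : Int) (modsys : List Int) : String :=
  let mul := modsys.foldl (fun acc a => acc * a) 1
  if mul ≤ n then "Not applicable"
  else if 2 ≤ modsys.length then
    if !((pyPairs modsys).all (fun b => isCoPrime b.1 b.2)) then "Not applicable"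
    else
      let list_ := modsys.map (fun x => PySem.Int.toStr (PySem.Int.mod n x))
      "-" ++ (PySem.Str.join "--" list_ ++ "-")
  else "Not applicable"

-- ===== PORT B =====
-- the coprimality-scan loop of Source B (early return "Not applicable"; falls through to the format string)
def altGo (n : Int) (modsys : List Int) : List Int → Int → String
  | [], _ =>
      "-" ++ PySem.Str.join "--" (modsys.map (fun m => PySem.Int.toStr (PySem.Int.mod n m))) ++ "-"
  | m :: rest, seen =>
      if Int.gcd m seen ≠ 1 then "Not applicable"
      else altGo n modsys rest (seen * m)

-- Source B's capped product loop: `some total` = the loop ran to completion (for/else), `none` = break at CAP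
def satProd : List Int → Int → Option Int
  | [], total => some total
  | m :: rest, total =>
      if (2 : Int) ^ 62 < total * m then none else satProd rest (total * m)

def fromNb2Str_alt (n : Int) (modsys : List Int) : String :=
  if modsys.length < 2 ∨ modsys.any (fun m => decide (m < 1)) then "Not applicable"
  else
    match satProd modsys 1 with
    | some total => if total ≤ n then "Not applicable" else altGo n modsys modsys 1
    | none => altGo n modsys modsys 1

-- ===== PRECONDITION & SPEC =====
-- Pre_ excludes exactly the inputs on which A raises ZeroDivisionError: isCoPrime is reached
-- (n < 0 makes mul = 0 > n false … i.e. mul > n, with 0 ∈ modsys and ≥ 2 moduli) and some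
-- combination pairs 0 with a second 0 or with a positive modulus, so min(a,b) = 0 divides.
-- B returns "Not applicable" on those inputs.
def Pre_fromNb2Str (n : Int) (modsys : List Int) : Prop :=
  ¬ (n < 0 ∧ (0 : Int) ∈ modsys ∧ 2 ≤ modsys.length ∧
      (2 ≤ modsys.count 0 ∨ ∃ m ∈ modsys, 0 < m))
instance (n : Int) (modsys : List Int) : Decidable (Pre_fromNb2Str n modsys) := by
  unfold Pre_fromNb2Str; infer_instance

def pvWitness_fromNb2Str : Int × List Int := (5, [3, 4])

def Spec_fromNb2Str (n : Int) (modsys : List Int) (out : String) : Prop := out = fromNb2Str_alt n modsys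
instance (n : Int) (modsys : List Int) (out : String) : Decidable (Spec_fromNb2Str n modsys out) := by unfold Spec_fromNb2Str; infer_instance

-- ===== CLAIM (what is proved, stated in full; the proofs are below) =====
def Claim_equal_fromNb2Str : Prop := ∀ (n : Int) (modsys : List Int), Dom_fromNb2Str n modsys → Pre_fromNb2Str n modsys → Spec_fromNb2Str n modsys (fromNb2Str n modsys)

-- ===== LEMMAS AND PROOFS =====

-- the Euclid loop returns gcd carrying the sign of the (current) minimum
theorem sign_mul_gcd_of_dvd (mx mn : Int) (h : mn ∣ mx) :
    mn.sign * Int.gcd mx mn = mn := by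
  rw [Int.gcd_eq_natAbs_gcd_natAbs, Nat.gcd_eq_right (Int.natAbs_dvd_natAbs.mpr h)]
  exact Int.sign_mul_natAbs mn

theorem pyMod_sign (mx mn : Int) (hne : mn ≠ 0) (ht : PySem.Int.mod mx mn ≠ 0) :
    (PySem.Int.mod mx mn).sign = mn.sign := by
  rcases lt_trichotomy mn 0 with hlt | heq | hgt
  · have hb := PySem.Int.mod_neg_bounds mx hlt
    rw [Int.sign_eq_neg_one_iff_neg.mpr (by omega), Int.sign_eq_neg_one_iff_neg.mpr hlt]
  · exact absurd heq hne
  · have h1 := PySem.Int.mod_nonneg mx hgt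
    rw [Int.sign_eq_one_iff_pos.mpr (by omega), Int.sign_eq_one_iff_pos.mpr hgt]

theorem pyMod_gcd (mx mn : Int) :
    Int.gcd mn (PySem.Int.mod mx mn) = Int.gcd mx mn := by
  have hdm := PySem.Int.floordiv_mul_add_mod mx mn
  have : PySem.Int.mod mx mn = mx + mn * (-(PySem.Int.floordiv mx mn)) := by linarith
  rw [this, Int.gcd_add_mul_left_right, Int.gcd_comm]

theorem pyEuclid_eq_aux : ∀ (k : Nat) (mx mn : Int), mn.natAbs ≤ k → mn ≠ 0 →
    pyEuclid mx mn = Int.sign mn * Int.gcd mx mn := by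
  intro k
  induction k with
  | zero => intro mx mn hle hne; omega
  | succ k ih =>
    intro mx mn hle hne
    rw [pyEuclid]
    by_cases ht : PySem.Int.mod mx mn = 0
    · rw [if_pos ht]
      exact (sign_mul_gcd_of_dvd mx mn ((PySem.Int.mod_eq_zero_iff_dvd mx mn).mp ht)).symm
    · rw [if_neg ht, if_neg hne]
      have hlt := pyModAbs_lt mx mn hne
      rw [ih mn (PySem.Int.mod mx mn) (by omega) ht]
      rw [pyMod_sign mx mn hne ht, pyMod_gcd mx mn]

theorem pyEuclid_eq (mx mn : Int) (h : mn ≠ 0) :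
    pyEuclid mx mn = Int.sign mn * Int.gcd mx mn :=
  pyEuclid_eq_aux mn.natAbs mx mn le_rfl h

theorem isCoPrime_char (a b : Int) (h : min a b ≠ 0) :
    isCoPrime a b = true ↔ 0 < a ∧ 0 < b ∧ Int.gcd a b = 1 := by
  unfold isCoPrime
  have hc : (if PySem.Int.mod (max a b) (min a b) = 0 then min a b
      else pyEuclid (max a b) (min a b)) = (min a b).sign * Int.gcd (max a b) (min a b) := by
    by_cases ht : PySem.Int.mod (max a b) (min a b) = 0
    · rw [if_pos ht]
      exact (sign_mul_gcd_of_dvd _ _ ((PySem.Int.mod_eq_zero_iff_dvd _ _).mp ht)).symm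
    · rw [if_neg ht]; exact pyEuclid_eq _ _ h
  have hgab : Int.gcd (max a b) (min a b) = Int.gcd a b := by
    rcases le_total a b with hab | hba
    · rw [max_eq_right hab, min_eq_left hab, Int.gcd_comm]
    · rw [max_eq_left hba, min_eq_right hba]
  have hgne : Int.gcd a b ≠ 0 := by
    intro h0
    rcases le_total a b with hab | hba
    · exact h (by rw [min_eq_left hab]; exact (Int.gcd_eq_zero_iff.mp h0).1)
    · exact h (by rw [min_eq_right hba]; exact (Int.gcd_eq_zero_iff.mp h0).2)
  simp only [hc, hgab, decide_eq_true_eq]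
  constructor
  · intro h1
    rcases lt_trichotomy (min a b) 0 with hlt | heq | hgt
    · rw [Int.sign_eq_neg_one_iff_neg.mpr hlt] at h1
      have : (0:Int) ≤ (Int.gcd a b : Int) := Int.natCast_nonneg _
      omega
    · exact absurd heq h
    · rw [Int.sign_eq_one_iff_pos.mpr hgt, one_mul] at h1
      have hab := lt_min_iff.mp hgt
      exact ⟨hab.1, hab.2, by exact_mod_cast h1⟩
  · rintro ⟨ha, hb, hg⟩
    rw [Int.sign_eq_one_iff_pos.mpr (lt_min ha hb), one_mul, hg]
    rfl

theorem pyPairs_forall (Q : Int → Int → Prop) :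
    ∀ l : List Int, (∀ p ∈ pyPairs l, Q p.1 p.2) ↔ l.Pairwise Q := by
  intro l
  induction l with
  | nil => simp [pyPairs]
  | cons x xs ih =>
    simp only [pyPairs, List.mem_append, List.mem_map, List.pairwise_cons, ← ih]
    constructor
    · intro h
      refine ⟨fun y hy => h (x, y) (Or.inl ⟨y, hy, rfl⟩), fun p hp => h p (Or.inr hp)⟩
    · rintro ⟨h1, h2⟩ p hp
      rcases hp with ⟨y, hy, rfl⟩ | hp
      · exact h1 y hy
      · exact h2 p hp

theorem pyPairs_mem : ∀ (l : List Int) (p : Int × Int), p ∈ pyPairs l →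
    p.1 ∈ l ∧ p.2 ∈ l ∧ (p.1 = p.2 → 2 ≤ l.count p.1) := by
  intro l
  induction l with
  | nil => simp [pyPairs]
  | cons x xs ih =>
    intro p hp
    simp only [pyPairs, List.mem_append, List.mem_map] at hp
    rcases hp with ⟨y, hy, rfl⟩ | hp
    · refine ⟨List.mem_cons_self, List.mem_cons_of_mem x hy, fun he => ?_⟩
      have hxy : x = y := he
      have h1 : 1 ≤ xs.count x := List.one_le_count_iff.mpr (by rw [hxy]; exact hy)
      show 2 ≤ (x :: xs).count x
      rw [List.count_cons_self]
      omega
    · obtain ⟨h1, h2, h3⟩ := ih p hp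
      refine ⟨List.mem_cons_of_mem x h1, List.mem_cons_of_mem x h2, fun he => ?_⟩
      have h4 := h3 he
      show 2 ≤ (x :: xs).count p.1
      rw [List.count_cons]
      split <;> omega

theorem pyPairs_cover : ∀ (l : List Int) (m : Int), m ∈ l → 2 ≤ l.length →
    ∃ p ∈ pyPairs l, p.1 = m ∨ p.2 = m := by
  intro l m hm hlen
  match l, hm with
  | x :: xs, hm =>
    match xs with
    | [] => simp at hlen
    | y :: ys =>
      rcases List.mem_cons.mp hm with rfl | hm'
      · exact ⟨(m, y), List.mem_append_left _ (List.mem_map_of_mem List.mem_cons_self),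
          Or.inl rfl⟩
      · exact ⟨(x, m), List.mem_append_left _ (List.mem_map_of_mem hm'), Or.inr rfl⟩

theorem foldl_mul_zero_init : ∀ (l : List Int),
    l.foldl (fun acc a => acc * a) 0 = 0 := by
  intro l
  induction l with
  | nil => rfl
  | cons x xs ih => simpa [List.foldl_cons] using ih

theorem foldl_mul_zero : ∀ (l : List Int) (init : Int), (0 : Int) ∈ l →
    l.foldl (fun acc a => acc * a) init = 0 := by
  intro l
  induction l with
  | nil => simp
  | cons x xs ih =>
    intro init h0
    rcases List.mem_cons.mp h0 with h | h
    · simp only [List.foldl_cons, ← h, mul_zero]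
      exact foldl_mul_zero_init xs
    · exact ih (init * x) h

theorem gcd_mul_one_iff (x a b : Int) :
    Int.gcd x (a * b) = 1 ↔ Int.gcd x a = 1 ∧ Int.gcd x b = 1 := by
  rw [Int.gcd_eq_natAbs_gcd_natAbs, Int.gcd_eq_natAbs_gcd_natAbs,
      Int.gcd_eq_natAbs_gcd_natAbs, Int.natAbs_mul]
  exact Nat.coprime_mul_iff_right

theorem foldl_mul_ge : ∀ (l : List Int) (t : Int), 0 < t → (∀ m ∈ l, (1 : Int) ≤ m) →
    t ≤ l.foldl (fun acc a => acc * a) t := by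
  intro l
  induction l with
  | nil => intro t _ _; exact le_refl t
  | cons m rest ih =>
    intro t ht hall
    have hm := hall m List.mem_cons_self
    have h1 : t ≤ t * m := le_mul_of_one_le_right (le_of_lt ht) hm
    have h2 : 0 < t * m := mul_pos ht (by omega)
    exact le_trans h1 (ih (t * m) h2 (fun x hx => hall x (List.mem_cons_of_mem m hx)))

theorem satProd_spec : ∀ (l : List Int) (t : Int), 0 < t → (∀ m ∈ l, (1 : Int) ≤ m) →
    satProd l t = some (l.foldl (fun acc a => acc * a) t) ∨
      (satProd l t = none ∧ (2 : Int) ^ 62 < l.foldl (fun acc a => acc * a) t) := by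
  intro l
  induction l with
  | nil => intro t _ _; exact Or.inl rfl
  | cons m rest ih =>
    intro t ht hall
    have hm := hall m List.mem_cons_self
    have h2 : 0 < t * m := mul_pos ht (by omega)
    rw [satProd, List.foldl_cons]
    by_cases hc : (2 : Int) ^ 62 < t * m
    · rw [if_pos hc]
      exact Or.inr ⟨rfl, lt_of_lt_of_le hc
        (foldl_mul_ge rest (t * m) h2 (fun x hx => hall x (List.mem_cons_of_mem m hx)))⟩
    · rw [if_neg hc]
      exact ih (t * m) h2 (fun x hx => hall x (List.mem_cons_of_mem m hx))

theorem altGo_eq (n : Int) (ms : List Int) :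
    ∀ (l : List Int) (seen : Int),
      altGo n ms l seen =
        if l.Pairwise (fun a b => Int.gcd a b = 1) ∧ (∀ m ∈ l, Int.gcd m seen = 1) then
          "-" ++ PySem.Str.join "--" (ms.map (fun m => PySem.Int.toStr (PySem.Int.mod n m))) ++ "-"
        else "Not applicable" := by
  intro l
  induction l with
  | nil => intro seen; simp [altGo]
  | cons m rest ih =>
    intro seen
    rw [altGo]
    by_cases hg : Int.gcd m seen = 1
    · rw [if_neg (by simpa using hg), ih (seen * m)]
      have hiff : (rest.Pairwise (fun a b => Int.gcd a b = 1) ∧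
            ∀ x ∈ rest, Int.gcd x (seen * m) = 1) ↔
          ((m :: rest).Pairwise (fun a b => Int.gcd a b = 1) ∧
            ∀ x ∈ m :: rest, Int.gcd x seen = 1) := by
        constructor
        · rintro ⟨hp, hall⟩
          refine ⟨List.pairwise_cons.mpr ⟨fun y hy => ?_, hp⟩, fun x hx => ?_⟩
          · rw [Int.gcd_comm]; exact ((gcd_mul_one_iff y seen m).mp (hall y hy)).2
          · rcases List.mem_cons.mp hx with rfl | hx
            · exact hg
            · exact ((gcd_mul_one_iff x seen m).mp (hall x hx)).1
        · rintro ⟨hp, hall⟩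
          obtain ⟨hm, hp'⟩ := List.pairwise_cons.mp hp
          refine ⟨hp', fun x hx => (gcd_mul_one_iff x seen m).mpr
            ⟨hall x (List.mem_cons_of_mem m hx), by rw [Int.gcd_comm]; exact hm x hx⟩⟩
      simp only [hiff]
    · rw [if_pos (by simpa using hg), if_neg]
      rintro ⟨-, hall⟩
      exact hg (hall m List.mem_cons_self)

-- ===== VERDICT (by name: the statement is the Claim_ definition above) =====
theorem fromNb2Str_spec : Claim_equal_fromNb2Str := by
  intro n modsys hdom hpre
  have hn31 : n ≤ 2147483648 := by
    unfold Dom_fromNb2Str pvDomInt at hdom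
    simp only [Bool.and_eq_true, List.all_eq_true, decide_eq_true_eq] at hdom
    exact hdom.1.2
  have h62 : (2 : Int) ^ 62 = 4611686018427387904 := by norm_num
  unfold Pre_fromNb2Str at hpre
  unfold Spec_fromNb2Str fromNb2Str fromNb2Str_alt
  dsimp only
  by_cases hlen : 2 ≤ modsys.length
  · by_cases hpos : ∀ m ∈ modsys, (1 : Int) ≤ m
    · -- all moduli positive: B runs the capped product and the gcd scan
      have hanyf : modsys.any (fun m => decide (m < 1)) = false := by
        rw [List.any_eq_false]
        intro m hm
        simpa using hpos m hm
      have hBcond : ¬(modsys.length < 2 ∨ (modsys.any fun m => decide (m < 1)) = true) := by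
        rintro (h | h)
        · omega
        · rw [hanyf] at h; exact Bool.false_ne_true h
      rw [if_neg hBcond]
      -- A's coprimality branch equals B's scan (whenever that branch is reached)
      have hscan :
          (if !((pyPairs modsys).all fun b => isCoPrime b.1 b.2) then "Not applicable"
            else "-" ++ (PySem.Str.join "--"
              (modsys.map fun x => PySem.Int.toStr (PySem.Int.mod n x)) ++ "-")) =
            altGo n modsys modsys 1 := by
        rw [altGo_eq]
        have hall : ((pyPairs modsys).all (fun b => isCoPrime b.1 b.2) = true) ↔
            modsys.Pairwise (fun a b => Int.gcd a b = 1) := by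
          rw [List.all_eq_true, ← pyPairs_forall]
          constructor
          · intro h p hp
            obtain ⟨h1, h2, -⟩ := pyPairs_mem modsys p hp
            have hpmin : min p.1 p.2 ≠ 0 :=
              ne_of_gt (lt_min (by have := hpos _ h1; omega) (by have := hpos _ h2; omega))
            exact ((isCoPrime_char p.1 p.2 hpmin).mp (h p hp)).2.2
          · intro h p hp
            obtain ⟨h1, h2, -⟩ := pyPairs_mem modsys p hp
            have ha := hpos _ h1
            have hb := hpos _ h2
            exact (isCoPrime_char p.1 p.2
              (ne_of_gt (lt_min (by omega) (by omega)))).mpr ⟨by omega, by omega, h p hp⟩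
        by_cases hpw : modsys.Pairwise (fun a b => Int.gcd a b = 1)
        · have hat : (pyPairs modsys).all (fun b => isCoPrime b.1 b.2) = true := hall.mpr hpw
          simp only [hat, Bool.not_true, Bool.false_eq_true, if_false]
          rw [if_pos ⟨hpw, fun m _ => Int.gcd_one⟩, ← String.append_assoc]
        · have hat : (pyPairs modsys).all (fun b => isCoPrime b.1 b.2) = false := by
            have h1 : ¬ ((pyPairs modsys).all (fun b => isCoPrime b.1 b.2) = true) :=
              fun h => hpw (hall.mp h)
            simpa using h1
          simp only [hat, Bool.not_false, if_true]
          rw [if_neg (fun hc => hpw hc.1)]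
      rcases satProd_spec modsys 1 one_pos hpos with hsp | ⟨hsp, hgt⟩
      · rw [hsp]
        dsimp only
        by_cases hmul : modsys.foldl (fun acc a => acc * a) 1 ≤ n
        · rw [if_pos hmul, if_pos hmul]
        · rw [if_neg hmul, if_pos hlen, if_neg hmul]
          exact hscan
      · rw [hsp]
        dsimp only
        rw [h62] at hgt
        have hmul : ¬ modsys.foldl (fun acc a => acc * a) 1 ≤ n := by omega
        rw [if_neg hmul, if_pos hlen]
        exact hscan
    · -- some modulus < 1: both sides answer "Not applicable"
      push Not at hpos
      obtain ⟨m, hm, hm1⟩ := hpos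
      have hBcond : modsys.length < 2 ∨ (modsys.any fun m => decide (m < 1)) = true :=
        Or.inr (List.any_eq_true.mpr ⟨m, hm, by simpa using hm1⟩)
      rw [if_pos hBcond]
      by_cases hmul : modsys.foldl (fun acc a => acc * a) 1 ≤ n
      · rw [if_pos hmul]
      · rw [if_neg hmul, if_pos hlen]
        have hmin : ∀ p ∈ pyPairs modsys, min p.1 p.2 ≠ 0 := by
          intro p hp hmin0
          obtain ⟨hp1, hp2, hcnt⟩ := pyPairs_mem modsys p hp
          have key : ∀ (u v : Int), u ∈ modsys → v ∈ modsys → u = 0 → 0 ≤ v →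
              (u = v → 2 ≤ modsys.count u) → False := by
            intro u v hu hv hu0 hv0 hcnt'
            subst hu0
            have hM0 : modsys.foldl (fun acc a => acc * a) 1 = 0 := foldl_mul_zero modsys 1 hu
            have hn : n < 0 := by rw [hM0] at hmul; omega
            have hnd : ¬(2 ≤ modsys.count 0 ∨ ∃ m ∈ modsys, 0 < m) :=
              fun hd => hpre ⟨hn, hu, hlen, hd⟩
            push Not at hnd
            have hv0' : v = 0 := le_antisymm (hnd.2 v hv) hv0
            exact absurd (hcnt' hv0'.symm) (by omega)
          rcases min_choice p.1 p.2 with hch | hch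
          · have h10 : p.1 = 0 := by rw [← hch]; exact hmin0
            have h2ge : 0 ≤ p.2 := hmin0 ▸ min_le_right p.1 p.2
            exact key p.1 p.2 hp1 hp2 h10 h2ge hcnt
          · have h20 : p.2 = 0 := by rw [← hch]; exact hmin0
            have h1ge : 0 ≤ p.1 := hmin0 ▸ min_le_left p.1 p.2
            exact key p.2 p.1 hp2 hp1 h20 h1ge (fun h => by rw [h]; exact hcnt h.symm)
        obtain ⟨p, hp, hcomp⟩ := pyPairs_cover modsys m hm hlen
        have hfalse : isCoPrime p.1 p.2 = false := by
          rw [← Bool.not_eq_true]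
          intro htrue
          obtain ⟨h1, h2, -⟩ := (isCoPrime_char p.1 p.2 (hmin p hp)).mp htrue
          rcases hcomp with h | h <;> omega
        have hat : (pyPairs modsys).all (fun b => isCoPrime b.1 b.2) = false :=
          List.all_eq_false.mpr ⟨p, hp, by simp [hfalse]⟩
        simp [hat]
  · -- fewer than two moduli: both sides answer "Not applicable"
    have hBcond : modsys.length < 2 ∨ (modsys.any fun m => decide (m < 1)) = true :=
      Or.inl (by omega)
    rw [if_pos hBcond]
    by_cases hmul : modsys.foldl (fun acc a => acc * a) 1 ≤ n
    · rw [if_pos hmul]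
    · rw [if_neg hmul, if_neg hlen]
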